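-- pv_equiv track=rewrite | github.com/burghoff/Scientific-Inkscape | scientific_inkscape/inkex1_3_0/inkex/text/parser.py | ttgenerator
-- ===== SOURCE A (Python) =====
-- TYP_TEXT = 1
--
-- TYP_TAIL = 0
--
-- def ttgenerator(numd, starti=0, stopi=None):
--     """
--     A generator for crawling through a general text descendant tree
--     Returns the current descendant index and typ (TYP_TAIL for tail,
--                                                   TYP_TEXT for text)
--     """
--     ddi = starti
--     if stopi is None:
--         stopi = numd
--     typ = TYP_TAIL
--     while True:
--         if typ == TYP_TEXT:
--             ddi += 1
--             typ = TYP_TAIL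
--         else:
--             typ = TYP_TEXT
--         if ddi == stopi and typ == TYP_TEXT:
--             return
--         yield ddi, typ
-- ===== SOURCE B (Python) =====
-- TYP_TEXT = 1
--
-- TYP_TAIL = 0
--
-- def ttgenerator(numd, starti=0, stopi=None):
--     """Counted per-index loop: each index i in [starti, stopi) contributes
--     its text (i, TYP_TEXT) followed by the next index's tail (i+1, TYP_TAIL)."""
--     if stopi is None:
--         stopi = numd
--     for i in range(starti, stopi):
--         yield i, TYP_TEXT
--         yield i + 1, TYP_TAIL
-- ===== Notes on version B (the rewrite author's own statement) =====
-- stated objective: simpler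
-- what changed: Replaced A's unbounded while-True two-phase toggle state machine by a counted for-range loop that emits the fixed pair (i, TEXT), (i+1, TAIL) for each index; Pre_ excludes stopi < starti, where A's generator never terminates when drained while B yields nothing.
import Mathlib
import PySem

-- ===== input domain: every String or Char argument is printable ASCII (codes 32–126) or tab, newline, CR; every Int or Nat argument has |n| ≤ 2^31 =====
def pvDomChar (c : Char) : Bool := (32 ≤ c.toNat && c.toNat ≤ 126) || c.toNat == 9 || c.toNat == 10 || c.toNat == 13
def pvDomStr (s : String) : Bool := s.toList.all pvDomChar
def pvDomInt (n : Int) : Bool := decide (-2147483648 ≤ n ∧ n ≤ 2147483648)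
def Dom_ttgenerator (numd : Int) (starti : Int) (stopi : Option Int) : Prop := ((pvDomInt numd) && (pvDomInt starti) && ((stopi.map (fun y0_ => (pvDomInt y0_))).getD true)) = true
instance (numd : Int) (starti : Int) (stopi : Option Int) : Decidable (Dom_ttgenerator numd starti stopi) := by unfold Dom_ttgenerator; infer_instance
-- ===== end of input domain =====

-- B replaces A's unbounded two-phase typ-toggle state machine by a counted per-index range loop (objective: simpler).


-- ===== PORT A =====
-- A's while-True toggle loop; the fuel argument only makes the (otherwise
-- diverging, Pre_-excluded) loop total and is large enough inside Pre_.
def ttA_loop (fuel : Nat) (stopi ddi typ : Int) : List (Int × Int) :=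
  match fuel with
  | 0 => []
  | f + 1 =>
    let ddi2 : Int := if typ = 1 then ddi + 1 else ddi
    let typ2 : Int := if typ = 1 then 0 else 1
    if ddi2 = stopi ∧ typ2 = 1 then []
    else (ddi2, typ2) :: ttA_loop f stopi ddi2 typ2

def ttgenerator (numd : Int) (starti : Int) (stopi : Option Int) : List (Int × Int) :=
  let stop := stopi.getD numd
  ttA_loop (2 * (stop - starti).toNat + 2) stop starti 0

-- ===== PORT B =====
-- B's for-range loop: each index i in [starti, stop) yields (i, 1) then (i+1, 0).
def ttgenerator_alt (numd : Int) (starti : Int) (stopi : Option Int) : List (Int × Int) :=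
  let stop := stopi.getD numd
  (PySem.List.pyRange starti stop 1).flatMap (fun i => [(i, 1), (i + 1, 0)])

-- ===== PRECONDITION & SPEC =====
-- Pre_ excludes stop < starti (stop = stopi if given, else numd), on which the
-- Python generator A never terminates when drained.
def Pre_ttgenerator (numd : Int) (starti : Int) (stopi : Option Int) : Prop :=
  starti ≤ stopi.getD numd
instance (numd : Int) (starti : Int) (stopi : Option Int) : Decidable (Pre_ttgenerator numd starti stopi) := by unfold Pre_ttgenerator; infer_instance
def pvWitness_ttgenerator : Int × Int × Option Int := (2, 0, none)

def Spec_ttgenerator (numd : Int) (starti : Int) (stopi : Option Int) (out : List (Int × Int)) : Prop := out = ttgenerator_alt numd starti stopi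
instance (numd : Int) (starti : Int) (stopi : Option Int) (out : List (Int × Int)) : Decidable (Spec_ttgenerator numd starti stopi out) := by unfold Spec_ttgenerator; infer_instance

-- ===== CLAIM (what is proved, stated in full; the proofs are below) =====
def Claim_equal_ttgenerator : Prop := ∀ (numd : Int) (starti : Int) (stopi : Option Int), Dom_ttgenerator numd starti stopi → Pre_ttgenerator numd starti stopi → Spec_ttgenerator numd starti stopi (ttgenerator numd starti stopi)

-- ===== LEMMAS AND PROOFS =====
theorem ttA_eq_flatMap (n : Nat) : ∀ (stopi ddi : Int), ddi ≤ stopi → n = (stopi - ddi).toNat →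
    ttA_loop (2 * n + 2) stopi ddi 0 =
      (PySem.List.pyRange ddi stopi 1).flatMap (fun i => [(i, 1), (i + 1, 0)]) := by
  induction n with
  | zero =>
    intro stopi ddi h1 hn
    have hds : ddi = stopi := by omega
    subst hds
    rw [PySem.List.pyRange_one_eq_nil (by omega)]
    simp [ttA_loop]
  | succ m ih =>
    intro stopi ddi h1 hn
    have hne : ¬ ddi = stopi := by omega
    rw [PySem.List.pyRange_one_cons (by omega)]
    have hA : ttA_loop (2 * (m + 1) + 2) stopi ddi 0 =
        (ddi, 1) :: (ddi + 1, 0) :: ttA_loop (2 * m + 2) stopi (ddi + 1) 0 := by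
      show ttA_loop (2 * m + 2 + 1 + 1) stopi ddi 0 = _
      simp [ttA_loop, hne]
    rw [hA, ih stopi (ddi + 1) (by omega) (by omega)]
    simp

-- ===== VERDICT (by name: the statement is the Claim_ definition above) =====
theorem ttgenerator_spec : Claim_equal_ttgenerator := by
  intro numd starti stopi _ hpre
  unfold Spec_ttgenerator ttgenerator ttgenerator_alt
  exact ttA_eq_flatMap ((stopi.getD numd - starti).toNat) (stopi.getD numd) starti hpre rfl
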